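-- pv_equiv track=rewrite | github.com/Timsbim/AoC | Tools/diagonals.py | antidiagonals
-- ===== SOURCE A (Python) =====
-- def antidiagonals(matrix):
--     rows, cols = len(matrix), len(matrix[0])
--
--     # Above main anti-diagonal (inclusive)
--     diags_above = tuple(
--         tuple(matrix[d-c][c] for c in range(min(d + 1, cols)))
--         for d in range(rows - 1, -1, -1)
--     )
--
--     # Below main anti-diagonal
--     diags_below = tuple(
--         tuple(matrix[r][d-r] for r in range(rows - 1, max(-1, d - cols), -1))
--         for d in range(rows, rows + cols - 1)
--     )
--
--     return diags_below, diags_above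
-- ===== SOURCE B (Python) =====
-- def antidiagonals(matrix):
--     rows, cols = len(matrix), len(matrix[0])
--     buckets = [[] for _ in range(rows + cols - 1)]
--     for c in range(cols):
--         for r in range(rows):
--             buckets[r + c].append(matrix[r][c])
--     above = tuple(tuple(b) for b in reversed(buckets[:rows]))
--     below = tuple(tuple(b) for b in buckets[rows:])
--     return below, above
-- ===== Notes on version B (the rewrite author's own statement) =====
-- stated objective: alternative
-- what changed: B replaces A's two nested index-arithmetic comprehensions (with their min/max boundary formulas) by one bucket pass that appends each cell to bucket r+c, then slices the bucket list into the below/above blocks.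
-- outside the precondition, e.g. on antidiagonals([[]]): A returns ((), ((),)), B returns ((), ()); on antidiagonals([]): A raises IndexError, B raises IndexError; on antidiagonals([[1, 2], [3]]): A raises IndexError, B raises IndexError
import Mathlib
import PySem

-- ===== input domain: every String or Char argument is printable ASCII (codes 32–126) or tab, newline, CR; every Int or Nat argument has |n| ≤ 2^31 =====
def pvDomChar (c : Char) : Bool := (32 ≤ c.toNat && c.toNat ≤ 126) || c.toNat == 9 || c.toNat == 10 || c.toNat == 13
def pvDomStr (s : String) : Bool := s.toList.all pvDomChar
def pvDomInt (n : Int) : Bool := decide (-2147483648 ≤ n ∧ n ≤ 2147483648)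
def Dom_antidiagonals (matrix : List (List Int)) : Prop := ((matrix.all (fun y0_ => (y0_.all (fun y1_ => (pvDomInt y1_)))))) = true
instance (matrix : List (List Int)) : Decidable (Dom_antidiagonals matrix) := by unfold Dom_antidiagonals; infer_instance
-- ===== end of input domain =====

-- B replaces A's two index-arithmetic comprehensions by a single bucket pass keyed on r+c
-- (idiomatic/alternative, same cost); return-value equivalence only, neither mutates its input.

-- ===== PORT A =====
def antidiagonals (matrix : List (List Int)) : List (List Int) × List (List Int) :=
  let rows : Int := matrix.length
  let cols : Int := (PySem.List.pyGetD matrix 0 []).length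
  let diags_above : List (List Int) :=
    (PySem.List.pyRange (rows - 1) (-1) (-1)).map (fun d =>
      (PySem.List.pyRange 0 (min (d + 1) cols) 1).map (fun c =>
        PySem.List.pyGetD (PySem.List.pyGetD matrix (d - c) []) c 0))
  let diags_below : List (List Int) :=
    (PySem.List.pyRange rows (rows + cols - 1) 1).map (fun d =>
      (PySem.List.pyRange (rows - 1) (max (-1) (d - cols)) (-1)).map (fun r =>
        PySem.List.pyGetD (PySem.List.pyGetD matrix r []) (d - r) 0))
  (diags_below, diags_above)

-- ===== PORT B =====
def antidiagonals_alt (matrix : List (List Int)) : List (List Int) × List (List Int) :=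
  let rows : Nat := matrix.length
  let cols : Nat := (matrix.headD []).length
  let buckets : List (List Int) :=
    (List.range cols).foldl (fun bs c =>
        (List.range rows).foldl (fun bs r =>
          bs.modify (r + c) (fun b => b ++ [(matrix.getD r []).getD c 0])) bs)
      (List.replicate (rows + cols - 1) [])
  let above : List (List Int) := (buckets.take rows).reverse
  let below : List (List Int) := buckets.drop rows
  (below, above)

-- ===== PRECONDITION & SPEC =====
-- Pre_ excludes the empty matrix (A raises IndexError on len(matrix[0])), ragged matrices with
-- some row shorter than the first (A raises IndexError while indexing), and zero-column matrices,
-- a degenerate corner on which A's value (rows empty diagonals) and B's (rows-1) are both accidental.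
def Pre_antidiagonals (matrix : List (List Int)) : Prop :=
  matrix ≠ [] ∧ 0 < (matrix.headD []).length ∧
    ∀ row ∈ matrix, (matrix.headD []).length ≤ row.length
instance (matrix : List (List Int)) : Decidable (Pre_antidiagonals matrix) := by
  unfold Pre_antidiagonals; infer_instance
def pvWitness_antidiagonals : List (List Int) := [[1, 2], [3, 4], [5, 6]]
def Spec_antidiagonals (matrix : List (List Int)) (out : List (List Int) × List (List Int)) : Prop := out = antidiagonals_alt matrix
instance (matrix : List (List Int)) (out : List (List Int) × List (List Int)) : Decidable (Spec_antidiagonals matrix out) := by unfold Spec_antidiagonals; infer_instance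

-- ===== CLAIM (what is proved, stated in full; the proofs are below) =====
def Claim_equal_antidiagonals : Prop := ∀ (matrix : List (List Int)), Dom_antidiagonals matrix → Pre_antidiagonals matrix → Spec_antidiagonals matrix (antidiagonals matrix)

-- ===== LEMMAS AND PROOFS =====

-- the cell accessor and the common description of one antidiagonal
def pvCell (matrix : List (List Int)) (r c : Nat) : Int := (matrix.getD r []).getD c 0

def pvDiag (matrix : List (List Int)) (d : Nat) : List Int :=
  ((List.range (matrix.headD []).length).filter
      (fun c => decide (c ≤ d ∧ d < matrix.length + c))).map (fun c => pvCell matrix (d - c) c)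

-- a band of a range, as a filter and as a shifted range
theorem pv_filter_range_band (n a b : Nat) :
    (List.range n).filter (fun c => decide (a ≤ c ∧ c < b)) =
      (List.range (min b n - a)).map (fun k => a + k) := by
  induction n with
  | zero => simp
  | succ n ih =>
    rw [List.range_succ, List.filter_append, ih]
    by_cases h : a ≤ n ∧ n < b
    · have h1 : min b (n + 1) - a = (min b n - a) + 1 := by omega
      rw [h1, List.range_succ, List.map_append]
      simp [h]
      omega
    · have h1 : min b (n + 1) - a = min b n - a := by omega
      rw [h1]
      simp [h]

theorem pv_length_inner (matrix : List (List Int)) (c n : Nat) (bs : List (List Int)) :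
    ((List.range n).foldl (fun bs r =>
        bs.modify (r + c) (fun b => b ++ [(matrix.getD r []).getD c 0])) bs).length
      = bs.length := by
  induction n generalizing bs with
  | zero => rfl
  | succ n ih =>
    rw [List.range_succ, List.foldl_append, List.foldl_cons, List.foldl_nil,
      List.length_modify, ih]

theorem pv_inner_getD (matrix : List (List Int)) (c n : Nat) (bs : List (List Int)) (d : Nat)
    (hd : d < bs.length) :
    ((List.range n).foldl (fun bs r =>
        bs.modify (r + c) (fun b => b ++ [(matrix.getD r []).getD c 0])) bs).getD d []
      = bs.getD d [] ++ (if c ≤ d ∧ d < n + c then [pvCell matrix (d - c) c] else []) := by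
  induction n generalizing bs with
  | zero => simp
  | succ n ih =>
    rw [List.range_succ, List.foldl_append]
    simp only [List.foldl_cons, List.foldl_nil]
    have hlen : ((List.range n).foldl (fun bs r =>
        bs.modify (r + c) (fun b => b ++ [(matrix.getD r []).getD c 0])) bs).length = bs.length :=
      pv_length_inner matrix c n bs
    by_cases hdc : d = n + c
    · have hget : ∀ (l : List (List Int)), d < l.length →
          (l.modify (n + c) (fun b => b ++ [(matrix.getD n []).getD c 0])).getD d []
            = l.getD d [] ++ [(matrix.getD n []).getD c 0] := by
        intro l hl
        subst hdc
        rw [List.getD_eq_getElem?_getD, List.getElem?_modify]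
        rw [List.getD_eq_getElem?_getD, List.getElem?_eq_getElem hl]
        simp [List.getElem?_eq_getElem hl]
      rw [hget _ (by omega), ih bs hd]
      have h1 : ¬ (c ≤ d ∧ d < n + c) := by omega
      have h2 : c ≤ d ∧ d < n + 1 + c := by omega
      simp [pvCell, hdc]
    · have hget : (((List.range n).foldl (fun bs r =>
          bs.modify (r + c) (fun b => b ++ [(matrix.getD r []).getD c 0])) bs).modify (n + c)
            (fun b => b ++ [(matrix.getD n []).getD c 0])).getD d []
          = ((List.range n).foldl (fun bs r =>
              bs.modify (r + c) (fun b => b ++ [(matrix.getD r []).getD c 0])) bs).getD d [] := by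
        simp [List.getD_eq_getElem?_getD, Ne.symm hdc]
      rw [hget, ih bs hd]
      by_cases hcd : c ≤ d ∧ d < n + c
      · rw [if_pos hcd, if_pos (by omega : c ≤ d ∧ d < n + 1 + c)]
      · rw [if_neg hcd, if_neg (by omega : ¬ (c ≤ d ∧ d < n + 1 + c))]

def pvStep (matrix : List (List Int)) (bs : List (List Int)) (c : Nat) : List (List Int) :=
  (List.range matrix.length).foldl (fun bs r =>
    bs.modify (r + c) (fun b => b ++ [(matrix.getD r []).getD c 0])) bs

theorem pv_outer_length (matrix : List (List Int)) (m : Nat) (bs : List (List Int)) :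
    ((List.range m).foldl (pvStep matrix) bs).length = bs.length := by
  induction m generalizing bs with
  | zero => rfl
  | succ m ih =>
    rw [List.range_succ, List.foldl_append]
    simp only [List.foldl_cons, List.foldl_nil]
    rw [pvStep, pv_length_inner, ih]

theorem pv_outer_getD (matrix : List (List Int)) (m : Nat) (L : Nat) (d : Nat) (hd : d < L) :
    ((List.range m).foldl (pvStep matrix) (List.replicate L [])).getD d []
      = ((List.range m).filter
          (fun c => decide (c ≤ d ∧ d < matrix.length + c))).map (fun c => pvCell matrix (d - c) c) := by
  induction m with
  | zero => simp
  | succ m ih =>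
    rw [List.range_succ, List.foldl_append]
    simp only [List.foldl_cons, List.foldl_nil]
    rw [pvStep, pv_inner_getD matrix m matrix.length _ d
        (by rw [pv_outer_length, List.length_replicate]; omega), ih,
      List.filter_append, List.map_append]
    by_cases h : m ≤ d ∧ d < matrix.length + m
    · simp [h]
    · simp [h]
  
theorem pv_buckets_eq (matrix : List (List Int)) :
    (List.range (matrix.headD []).length).foldl (pvStep matrix)
        (List.replicate (matrix.length + (matrix.headD []).length - 1) [])
      = (List.range (matrix.length + (matrix.headD []).length - 1)).map (pvDiag matrix) := by
  apply List.ext_getElem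
  · rw [pv_outer_length, List.length_replicate, List.length_map, List.length_range]
  · intro i h1 h2
    have hi : i < matrix.length + (matrix.headD []).length - 1 := by
      rw [pv_outer_length, List.length_replicate] at h1; exact h1
    have := pv_outer_getD matrix (matrix.headD []).length
      (matrix.length + (matrix.headD []).length - 1) i hi
    rw [List.getD_eq_getElem?_getD, List.getElem?_eq_getElem h1] at this
    simp only [Option.getD_some] at this
    rw [this]
    simp [pvDiag]

-- pvDiag as a shifted-range map (uniform in d)
theorem pv_diag_eq (matrix : List (List Int)) (d : Nat) :
    pvDiag matrix d
      = (List.range (min (d + 1) (matrix.headD []).length - (d + 1 - matrix.length))).map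
          (fun k => pvCell matrix (d - (d + 1 - matrix.length + k)) (d + 1 - matrix.length + k)) := by
  rw [pvDiag]
  have hcong : (List.range (matrix.headD []).length).filter
        (fun c => decide (c ≤ d ∧ d < matrix.length + c))
      = (List.range (matrix.headD []).length).filter
        (fun c => decide (d + 1 - matrix.length ≤ c ∧ c < d + 1)) := by
    apply List.filter_congr
    intro c _
    simp only [decide_eq_decide]
    omega
  rw [hcong, pv_filter_range_band, List.map_map]
  rfl


-- the foldl of pv_buckets_eq, written with the literal lambda of the port
theorem pv_buckets_eq' (matrix : List (List Int)) :
    (List.range (matrix.headD []).length).foldl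
        (fun bs c => (List.range matrix.length).foldl
          (fun bs r => bs.modify (r + c) (fun b => b ++ [(matrix.getD r []).getD c 0])) bs)
        (List.replicate (matrix.length + (matrix.headD []).length - 1) [])
      = (List.range (matrix.length + (matrix.headD []).length - 1)).map (pvDiag matrix) :=
  pv_buckets_eq matrix

-- each entry of A's "above" block is an antidiagonal
theorem pv_above_entry (matrix : List (List Int)) (d : Nat) (hd : d < matrix.length) :
    (PySem.List.pyRange 0 (min ((d : Int) + 1) ((matrix.headD []).length : Int)) 1).map
        (fun c => PySem.List.pyGetD (PySem.List.pyGetD matrix ((d : Int) - c) []) c 0)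
      = pvDiag matrix d := by
  rw [pv_diag_eq, PySem.List.pyRange_one]
  have h0 : d + 1 - matrix.length = 0 := by omega
  have hN : (min ((d : Int) + 1) ((matrix.headD []).length : Int) - 0).toNat
      = min (d + 1) (matrix.headD []).length - (d + 1 - matrix.length) := by omega
  rw [hN, List.map_map]
  apply List.map_congr_left
  intro k hk
  have hkN := List.mem_range.mp hk
  have hkd : k ≤ d := by omega
  have e1 : (d : Int) - (k : Int) = ((d - k : Nat) : Int) := by omega
  simp [Function.comp, e1, PySem.List.pyGetD_natCast, pvCell, h0]

-- each entry of A's "below" block is an antidiagonal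
theorem pv_below_entry (matrix : List (List Int)) (i : Nat)
    (_hi : i < (matrix.headD []).length - 1) :
    (PySem.List.pyRange ((matrix.length : Int) - 1)
        (max (-1) ((matrix.length : Int) + (i : Int) - ((matrix.headD []).length : Int))) (-1)).map
        (fun r => PySem.List.pyGetD (PySem.List.pyGetD matrix r [])
          ((matrix.length : Int) + (i : Int) - r) 0)
      = pvDiag matrix (matrix.length + i) := by
  rw [pv_diag_eq, PySem.List.pyRange_neg_one]
  have ha : matrix.length + i + 1 - matrix.length = i + 1 := by omega
  have hN : ((matrix.length : Int) - 1
        - max (-1) ((matrix.length : Int) + (i : Int) - ((matrix.headD []).length : Int))).toNat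
      = min (matrix.length + i + 1) (matrix.headD []).length
        - (matrix.length + i + 1 - matrix.length) := by omega
  rw [hN, List.map_map]
  apply List.map_congr_left
  intro k hk
  have hkN := List.mem_range.mp hk
  have hkR : k + 1 ≤ matrix.length := by omega
  have e1 : (matrix.length : Int) - 1 - (k : Int) = ((matrix.length - 1 - k : Nat) : Int) := by
    omega
  have e2 : (matrix.length : Int) + (i : Int) - (((matrix.length - 1 - k : Nat) : Int))
      = ((i + 1 + k : Nat) : Int) := by omega
  simp only [Function.comp, e1, e2, PySem.List.pyGetD_natCast, pvCell, ha]
  congr 2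
  omega

theorem antidiagonals_spec0 (matrix : List (List Int)) (hpre : Pre_antidiagonals matrix) :
    antidiagonals matrix = antidiagonals_alt matrix := by
  obtain ⟨hne, hC, hrow⟩ := hpre
  have hcols : PySem.List.pyGetD matrix 0 [] = matrix.headD [] := by
    cases matrix with
    | nil => exact absurd rfl hne
    | cons a l => simp [PySem.List.pyGetD_zero_cons]
  have hR1 : 1 ≤ matrix.length := by
    cases matrix with
    | nil => exact absurd rfl hne
    | cons a l => simp
  simp only [antidiagonals, antidiagonals_alt, hcols]
  rw [pv_buckets_eq']
  simp only [Prod.mk.injEq]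
  constructor
  · -- below part
    rw [PySem.List.pyRange_one]
    have hc1 : ((matrix.length : Int) + ((matrix.headD []).length : Int) - 1
        - (matrix.length : Int)).toNat = (matrix.headD []).length - 1 := by omega
    rw [hc1]
    apply List.ext_getElem
    · simp only [List.length_map, List.length_range, List.length_drop]
      omega
    · intro i h1 h2
      simp only [List.length_map, List.length_range] at h1
      have hi : i < (matrix.headD []).length - 1 := h1
      simp only [List.getElem_drop, List.getElem_map, List.getElem_range]
      exact pv_below_entry matrix i hi
  · -- above part
    rw [PySem.List.pyRange_neg_one]
    have hc2 : ((matrix.length : Int) - 1 - -1).toNat = matrix.length := by omega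
    rw [hc2]
    apply List.ext_getElem
    · simp only [List.length_map, List.length_range, List.length_reverse, List.length_take]
      omega
    · intro j h1 h2
      simp only [List.length_map, List.length_range] at h1
      simp only [List.getElem_map, List.getElem_range, List.getElem_reverse, List.getElem_take,
        List.length_take, List.length_map, List.length_range]
      have emin : min matrix.length (matrix.length + (matrix.headD []).length - 1)
          = matrix.length := by omega
      rw [emin]
      have e1 : (matrix.length : Int) - 1 - (j : Int)
          = ((matrix.length - 1 - j : Nat) : Int) := by omega
      rw [e1]
      exact pv_above_entry matrix (matrix.length - 1 - j) (by omega)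

-- ===== VERDICT (by name: the statement is the Claim_ definition above) =====
theorem antidiagonals_spec : Claim_equal_antidiagonals := by
  intro matrix _ hpre
  exact antidiagonals_spec0 matrix hpre
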